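-- pv_equiv track=rewrite | github.com/JayAkagi/python | day14/main.py | follower_difference_count
-- ===== SOURCE A (Python) =====
-- def follower_difference_count(icon_a, icon_b):
--     compare = [icon_a["follower_count"], icon_b["follower_count"]]
--
--     for i in range(len(compare)):
--         for j in range(len(compare) - i -1):
--             if compare[j] > compare[j+1]:
--                 temp = compare[j]
--                 compare[j] = compare[j+1]
--                 compare[j+1] = temp
--     difference = compare[1] - compare[0]
--     return difference
-- ===== SOURCE B (Python) =====
-- def follower_difference_count(icon_a, icon_b):
--     return abs(icon_a["follower_count"] - icon_b["follower_count"])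
-- ===== Notes on version B (the rewrite author's own statement) =====
-- stated objective: simpler
-- what changed: Replaces building a 2-element list, bubble-sorting it with nested loops and subtracting, by the direct closed form abs(a - b).
import Mathlib
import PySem

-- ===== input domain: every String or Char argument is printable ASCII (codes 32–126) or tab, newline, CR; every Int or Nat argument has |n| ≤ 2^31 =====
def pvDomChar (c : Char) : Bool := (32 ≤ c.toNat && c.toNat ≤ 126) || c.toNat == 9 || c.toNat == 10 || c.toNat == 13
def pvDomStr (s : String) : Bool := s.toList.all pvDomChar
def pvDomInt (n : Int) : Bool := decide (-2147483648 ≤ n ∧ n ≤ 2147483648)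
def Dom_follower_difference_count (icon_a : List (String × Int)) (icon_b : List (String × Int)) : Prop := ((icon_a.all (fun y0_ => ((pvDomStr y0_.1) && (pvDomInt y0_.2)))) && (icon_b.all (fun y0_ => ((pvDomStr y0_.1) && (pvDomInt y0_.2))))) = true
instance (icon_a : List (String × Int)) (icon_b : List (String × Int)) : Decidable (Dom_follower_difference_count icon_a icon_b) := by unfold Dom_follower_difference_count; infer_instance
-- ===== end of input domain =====

-- B replaces A's build-a-list / bubble-sort / subtract with the closed form abs(a - b); objective: simpler.

-- ===== PORT A =====
-- literal transliteration: compare = [icon_a["follower_count"], icon_b["follower_count"]];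
-- nested bubble-sort loops over range(len(compare)) / range(len(compare)-i-1) with swaps;
-- return compare[1] - compare[0].  Missing-key (KeyError) inputs are excluded by Pre_,
-- so the `.getD 0` default is unreachable under Pre_.
def follower_difference_count (icon_a : List (String × Int)) (icon_b : List (String × Int)) : Int :=
  let fa := ((PySem.Dict.mk icon_a).get? "follower_count").getD 0
  let fb := ((PySem.Dict.mk icon_b).get? "follower_count").getD 0
  let compare0 : List Int := [fa, fb]
    let compare :=
      (PySem.List.pyRange 0 (compare0.length : Int) 1).foldl (fun c i =>
        (PySem.List.pyRange 0 ((c.length : Int) - i - 1) 1).foldl (fun c j =>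
          if PySem.List.pyGetD c j 0 > PySem.List.pyGetD c (j+1) 0 then
            let temp := PySem.List.pyGetD c j 0
            PySem.List.pySetD (PySem.List.pySetD c j (PySem.List.pyGetD c (j+1) 0)) (j+1) temp
          else c) c) compare0
  PySem.List.pyGetD compare 1 0 - PySem.List.pyGetD compare 0 0

-- ===== PORT B =====
-- literal transliteration of Source B: abs(icon_a["follower_count"] - icon_b["follower_count"])
def follower_difference_count_alt (icon_a : List (String × Int)) (icon_b : List (String × Int)) : Int :=
  |((PySem.Dict.mk icon_a).get? "follower_count").getD 0 - ((PySem.Dict.mk icon_b).get? "follower_count").getD 0|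

-- ===== PRECONDITION & SPEC =====
-- Pre_ excludes exactly the inputs where Python A raises KeyError: a dict with no "follower_count" key.
def Pre_follower_difference_count (icon_a : List (String × Int)) (icon_b : List (String × Int)) : Prop :=
  ((PySem.Dict.mk icon_a).get? "follower_count").isSome = true ∧
  ((PySem.Dict.mk icon_b).get? "follower_count").isSome = true
instance (icon_a : List (String × Int)) (icon_b : List (String × Int)) : Decidable (Pre_follower_difference_count icon_a icon_b) := by unfold Pre_follower_difference_count; infer_instance
def pvWitness_follower_difference_count : (List (String × Int)) × (List (String × Int)) :=
  ([("follower_count", 52)], [("follower_count", 13)])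

def Spec_follower_difference_count (icon_a : List (String × Int)) (icon_b : List (String × Int)) (out : Int) : Prop := out = follower_difference_count_alt icon_a icon_b
instance (icon_a : List (String × Int)) (icon_b : List (String × Int)) (out : Int) : Decidable (Spec_follower_difference_count icon_a icon_b out) := by unfold Spec_follower_difference_count; infer_instance

-- ===== CLAIM (what is proved, stated in full; the proofs are below) =====
def Claim_equal_follower_difference_count : Prop := ∀ (icon_a : List (String × Int)) (icon_b : List (String × Int)), Dom_follower_difference_count icon_a icon_b → Pre_follower_difference_count icon_a icon_b → Spec_follower_difference_count icon_a icon_b (follower_difference_count icon_a icon_b)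

-- ===== LEMMAS AND PROOFS =====
-- A's bubble sort of the two looked-up values, followed by the subtraction, is |fa - fb|.
lemma follower_core (fa fb : Int) :
    (let compare0 : List Int := [fa, fb]
     let compare :=
       (PySem.List.pyRange 0 (compare0.length : Int) 1).foldl (fun c i =>
         (PySem.List.pyRange 0 ((c.length : Int) - i - 1) 1).foldl (fun c j =>
           if PySem.List.pyGetD c j 0 > PySem.List.pyGetD c (j+1) 0 then
             let temp := PySem.List.pyGetD c j 0
             PySem.List.pySetD (PySem.List.pySetD c j (PySem.List.pyGetD c (j+1) 0)) (j+1) temp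
           else c) c) compare0
     PySem.List.pyGetD compare 1 0 - PySem.List.pyGetD compare 0 0) = |fa - fb| := by
  simp only [List.length_cons, List.length_nil]
  rw [show ((0 + 1 + 1 : Nat) : Int) = 2 from by norm_num,
     show PySem.List.pyRange 0 2 = [0, 1] from by decide]
  by_cases h : fa > fb <;>
    simp [List.foldl, h, PySem.List.pyGetD, PySem.List.pyGet?, PySem.List.pyIdx?,
      PySem.List.pySetD, PySem.List.pySet?, PySem.List.pyRange] <;>
    rcases abs_cases (fa - fb) with ⟨h1, h2⟩ | ⟨h1, h2⟩ <;> omega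

-- ===== VERDICT (by name: the statement is the Claim_ definition above) =====
theorem follower_difference_count_spec : Claim_equal_follower_difference_count := by
  intro icon_a icon_b _ hpre
  unfold Spec_follower_difference_count follower_difference_count follower_difference_count_alt
  exact follower_core _ _
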